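-- pv_equiv track=rewrite | github.com/mfreema1/cs115-old | merge.py | drop_matches
-- ===== SOURCE A (Python) =====
-- def drop_matches(list1, list2):
--     """returns a list of the elements that the two lists have in common"""
--     list1.sort()
--     list2.sort()
--     matches = i = j = 0
--     lst = []
--     while i < len(list1) and j < len(list2):
--         if list1[i] == list2[j]:
--             matches += 1
--             i += 1
--             j += 1
--         elif list1[i] < list2[j]:
--             lst.append(list1[i])
--             i += 1
--         else:
--             lst.append(list2[j])
--             j += 1
--     while i < len(list1):
--         lst.append(list1[i])
--         i += 1
--     while j < len(list2):
--         lst.append(list2[j])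
--         j += 1
--     return lst
-- ===== SOURCE B (Python) =====
-- def drop_matches(list1, list2):
--     """returns a list of the elements that the two lists have in common"""
--     list1.sort()
--     list2.sort()
--     c1 = {}
--     for x in list1:
--         c1[x] = c1.get(x, 0) + 1
--     c2 = {}
--     for y in list2:
--         c2[y] = c2.get(y, 0) + 1
--     return [v for v in sorted(set(list1 + list2))
--               for _ in range(abs(c1.get(v, 0) - c2.get(v, 0)))]
-- ===== Notes on version B (the rewrite author's own statement) =====
-- stated objective: alternative
-- what changed: Replaces A's two-pointer merge over the two sorted lists with a count-and-combine strategy: build a frequency dict for each list, then emit each distinct value (in sorted order) abs(c1-c2) times.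
import Mathlib
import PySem

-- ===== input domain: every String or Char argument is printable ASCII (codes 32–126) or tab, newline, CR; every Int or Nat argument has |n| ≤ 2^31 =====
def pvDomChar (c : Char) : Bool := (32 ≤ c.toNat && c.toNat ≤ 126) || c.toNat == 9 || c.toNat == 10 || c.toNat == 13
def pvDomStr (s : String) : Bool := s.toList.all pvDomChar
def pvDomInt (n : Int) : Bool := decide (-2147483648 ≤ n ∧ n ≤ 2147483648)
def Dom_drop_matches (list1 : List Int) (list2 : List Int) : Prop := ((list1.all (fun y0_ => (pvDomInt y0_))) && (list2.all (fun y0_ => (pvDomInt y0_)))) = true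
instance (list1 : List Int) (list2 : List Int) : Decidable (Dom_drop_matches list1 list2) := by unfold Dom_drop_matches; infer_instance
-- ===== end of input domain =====

-- B replaces A's two-pointer merge with per-value frequency counts (same result, same O(n log n) cost;
-- like A's Python, B's Python sorts both argument lists in place — the equivalence proved is about the return value).


-- ===== PORT A =====
-- A's three while loops over the two sorted lists: the main two-pointer loop
-- (drop equal heads, emit the smaller head), then the two drain loops (acc ++ xs ++ ys).
-- (A's 'matches' counter is dead state — never read — and is not carried.)
def dropLoop (acc : List Int) : List Int → List Int → List Int
  | x :: xs, y :: ys =>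
      if x = y then dropLoop acc xs ys
      else if x < y then dropLoop (acc ++ [x]) xs (y :: ys)
      else dropLoop (acc ++ [y]) (x :: xs) ys
  | xs, ys => acc ++ xs ++ ys
termination_by xs ys => xs.length + ys.length

def drop_matches (list1 : List Int) (list2 : List Int) : List Int :=
  dropLoop [] (PySem.List.sorted list1 (fun x => x) false)
             (PySem.List.sorted list2 (fun x => x) false)

-- ===== PORT B =====
-- Source B: sort both lists, build a frequency dict of each ('c[x] = c.get(x, 0) + 1'),
-- then for each v in sorted(set(list1 + list2)) emit v abs(c1.get(v,0) - c2.get(v,0)) times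
-- ('for _ in range(n)' yields n copies: List.replicate).
def drop_matches_alt (list1 : List Int) (list2 : List Int) : List Int :=
  let s1 := PySem.List.sorted list1 (fun x => x) false
  let s2 := PySem.List.sorted list2 (fun x => x) false
  let c1 := s1.foldl (fun d x => d.insert x (d.getD x 0 + 1)) (PySem.Dict.empty : PySem.Dict Int Int)
  let c2 := s2.foldl (fun d y => d.insert y (d.getD y 0 + 1)) (PySem.Dict.empty : PySem.Dict Int Int)
  (PySem.List.sorted (PySem.Set.ofList (s1 ++ s2)) (fun v => v) false).flatMap
    (fun v => List.replicate (Int.toNat |c1.getD v 0 - c2.getD v 0|) v)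

-- ===== PRECONDITION & SPEC =====
def Spec_drop_matches (list1 : List Int) (list2 : List Int) (out : List Int) : Prop := out = drop_matches_alt list1 list2
instance (list1 : List Int) (list2 : List Int) (out : List Int) : Decidable (Spec_drop_matches list1 list2 out) := by unfold Spec_drop_matches; infer_instance

-- ===== CLAIM (what is proved, stated in full; the proofs are below) =====
def Claim_equal_drop_matches : Prop := ∀ (list1 : List Int) (list2 : List Int), Dom_drop_matches list1 list2 → Spec_drop_matches list1 list2 (drop_matches list1 list2)

-- ===== LEMMAS AND PROOFS =====

-- the accumulator-free form of A's merge loop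
def md : List Int → List Int → List Int
  | x :: xs, y :: ys =>
      if x = y then md xs ys
      else if x < y then x :: md xs (y :: ys)
      else y :: md (x :: xs) ys
  | xs, ys => xs ++ ys
termination_by xs ys => xs.length + ys.length

lemma dropLoop_eq_md (xs ys acc : List Int) : dropLoop acc xs ys = acc ++ md xs ys := by
  induction xs, ys using md.induct generalizing acc with
  | case1 xs y ys ih => simp [dropLoop, md, ih]
  | case2 x xs y ys h h2 ih => simp [dropLoop, md, h, h2, ih]
  | case3 x xs y ys h h2 ih => simp [dropLoop, md, h, h2, ih]
  | case4 xs ys h =>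
      cases xs with
      | nil => simp [dropLoop, md]
      | cons a as => cases ys with
        | nil => simp [dropLoop, md]
        | cons b bs => exact (h a as b bs rfl rfl).elim

-- a value below the head of a sorted list does not occur in it
lemma count_eq_zero_of_lt_head (x y : Int) (ys : List Int)
    (hs : (y :: ys).Pairwise (· ≤ ·)) (hxy : x < y) : (y :: ys).count x = 0 := by
  rw [List.count_eq_zero]
  intro hmem
  rcases List.mem_cons.mp hmem with h | h
  · omega
  · have := (List.pairwise_cons.mp hs).1 x h; omega

lemma mem_md (v : Int) (xs ys : List Int) (h : v ∈ md xs ys) : v ∈ xs ∨ v ∈ ys := by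
  induction xs, ys using md.induct with
  | case1 xs y ys ih =>
      rw [md] at h; simp only [if_true] at h
      rcases ih h with h' | h' <;> simp [h']
  | case2 x xs y ys hne hlt ih =>
      rw [md] at h; simp only [if_neg hne, if_pos hlt] at h
      rcases List.mem_cons.mp h with h' | h'
      · simp [h']
      · rcases ih h' with h'' | h'' <;> simp [h'']
  | case3 x xs y ys hne hlt ih =>
      rw [md] at h; simp only [if_neg hne, if_neg hlt] at h
      rcases List.mem_cons.mp h with h' | h'
      · simp [h']
      · rcases ih h' with h'' | h'' <;> simp [h'']
  | case4 xs ys hno =>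
      cases xs with
      | nil => right; simpa [md] using h
      | cons a as => cases ys with
        | nil => left; simpa [md] using h
        | cons b bs => exact (hno a as b bs rfl rfl).elim

lemma md_pairwise (xs ys : List Int) (hx : xs.Pairwise (· ≤ ·)) (hy : ys.Pairwise (· ≤ ·)) :
    (md xs ys).Pairwise (· ≤ ·) := by
  induction xs, ys using md.induct with
  | case1 xs y ys ih =>
      rw [md]; simp only [if_true]
      exact ih hx.tail hy.tail
  | case2 x xs y ys hne hlt ih =>
      rw [md]; simp only [if_neg hne, if_pos hlt]
      refine List.pairwise_cons.mpr ⟨?_, ih hx.tail hy⟩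
      intro a ha
      rcases mem_md a _ _ ha with h | h
      · exact (List.pairwise_cons.mp hx).1 a h
      · rcases List.mem_cons.mp h with h' | h'
        · omega
        · have := (List.pairwise_cons.mp hy).1 a h'; omega
  | case3 x xs y ys hne hlt ih =>
      rw [md]; simp only [if_neg hne, if_neg hlt]
      refine List.pairwise_cons.mpr ⟨?_, ih hx hy.tail⟩
      intro a ha
      rcases mem_md a _ _ ha with h | h
      · rcases List.mem_cons.mp h with h' | h'
        · omega
        · have := (List.pairwise_cons.mp hx).1 a h'; omega
      · exact (List.pairwise_cons.mp hy).1 a h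
  | case4 xs ys hno =>
      cases xs with
      | nil => simpa [md] using hy
      | cons a as => cases ys with
        | nil => simpa [md] using hx
        | cons b bs => exact (hno a as b bs rfl rfl).elim

-- A's merge keeps |count₁ v - count₂ v| copies of every value v
lemma md_count (xs ys : List Int) (hx : xs.Pairwise (· ≤ ·)) (hy : ys.Pairwise (· ≤ ·)) (v : Int) :
    (md xs ys).count v = max (xs.count v) (ys.count v) - min (xs.count v) (ys.count v) := by
  induction xs, ys using md.induct with
  | case1 xs y ys ih =>
      rw [md]; simp only [if_true]
      rw [ih hx.tail hy.tail]
      by_cases h : y = v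
      · subst h; rw [List.count_cons_self, List.count_cons_self]; omega
      · rw [List.count_cons_of_ne (by omega : y ≠ v), List.count_cons_of_ne (by omega : y ≠ v)]
  | case2 x xs y ys hne hlt ih =>
      rw [md]; simp only [if_neg hne, if_pos hlt]
      have hc := ih hx.tail hy
      by_cases h : x = v
      · subst h
        have h0 : (y :: ys).count x = 0 := count_eq_zero_of_lt_head x y ys hy hlt
        rw [List.count_cons_self, hc, h0, List.count_cons_self]
        omega
      · rw [List.count_cons_of_ne (by omega : x ≠ v), hc,
            List.count_cons_of_ne (by omega : x ≠ v)]
  | case3 x xs y ys hne hlt ih =>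
      rw [md]; simp only [if_neg hne, if_neg hlt]
      have hc := ih hx hy.tail
      by_cases h : y = v
      · subst h
        have h0 : (x :: xs).count y = 0 :=
          count_eq_zero_of_lt_head y x xs hx (by omega)
        rw [List.count_cons_self, hc, h0, List.count_cons_self]
        omega
      · rw [List.count_cons_of_ne (by omega : y ≠ v), hc,
            List.count_cons_of_ne (by omega : y ≠ v)]
  | case4 xs ys hno =>
      cases xs with
      | nil => simp [md]
      | cons a as => cases ys with
        | nil => simp [md]
        | cons b bs => exact (hno a as b bs rfl rfl).elim

lemma flatMap_replicate_pairwise (V : List Int) (k : Int → Nat) (hV : V.Pairwise (· < ·)) :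
    (V.flatMap (fun v => List.replicate (k v) v)).Pairwise (· ≤ ·) := by
  induction V with
  | nil => simp
  | cons v V ih =>
      rw [List.flatMap_cons, List.pairwise_append]
      refine ⟨List.pairwise_replicate.mpr (by simp), ih hV.tail, ?_⟩
      intro a ha b hb
      rcases List.eq_of_mem_replicate ha with rfl
      rcases List.mem_flatMap.mp hb with ⟨u, hu, hbu⟩
      have hb' := List.eq_of_mem_replicate hbu
      have := (List.pairwise_cons.mp hV).1 u hu
      omega

lemma flatMap_replicate_count (V : List Int) (k : Int → Nat) (hV : V.Nodup) (v : Int) :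
    (V.flatMap (fun u => List.replicate (k u) u)).count v = if v ∈ V then k v else 0 := by
  induction V with
  | nil => simp
  | cons u V ih =>
      rw [List.flatMap_cons, List.count_append, List.count_replicate, ih hV.of_cons]
      by_cases h : v = u
      · subst h
        have : v ∉ V := (List.nodup_cons.mp hV).1
        simp [this]
      · simp [h, Ne.symm h, List.mem_cons]

lemma abs_sub_toNat (a b : Nat) : (|(a : Int) - (b : Int)|).toNat = max a b - min a b := by
  rcases le_total (a : Int) (b : Int) with h | h
  · rw [abs_of_nonpos (by omega)]; omega
  · rw [abs_of_nonneg (by omega)]; omega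

-- ===== VERDICT (by name: the statement is the Claim_ definition above) =====
theorem drop_matches_spec : Claim_equal_drop_matches := by
  intro list1 list2 _
  unfold Spec_drop_matches drop_matches drop_matches_alt
  dsimp only
  rw [dropLoop_eq_md, List.nil_append]
  set s1 := PySem.List.sorted list1 (fun x => x) false with hs1def
  set s2 := PySem.List.sorted list2 (fun x => x) false with hs2def
  have hs1 : s1.Pairwise (· ≤ ·) := PySem.List.sorted_pairwise list1 (fun x => x)
  have hs2 : s2.Pairwise (· ≤ ·) := PySem.List.sorted_pairwise list2 (fun x => x)
  have hgetD1 : ∀ v : Int,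
      (s1.foldl (fun d x => d.insert x (d.getD x 0 + 1)) (PySem.Dict.empty : PySem.Dict Int Int)).getD v 0
        = (s1.count v : Int) := by
    intro v
    rw [PySem.Dict.getD_foldl_insert_add_one, PySem.Dict.getD_empty, zero_add]
  have hgetD2 : ∀ v : Int,
      (s2.foldl (fun d x => d.insert x (d.getD x 0 + 1)) (PySem.Dict.empty : PySem.Dict Int Int)).getD v 0
        = (s2.count v : Int) := by
    intro v
    rw [PySem.Dict.getD_foldl_insert_add_one, PySem.Dict.getD_empty, zero_add]
  simp only [hgetD1, hgetD2, abs_sub_toNat]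
  set V := PySem.List.sorted (PySem.Set.ofList (s1 ++ s2)) (fun v => v) false with hVdef
  have hVlt : V.Pairwise (· < ·) := PySem.List.sorted_ofList_pairwise_lt (s1 ++ s2)
  have hVnd : V.Nodup := hVlt.imp ne_of_lt
  have hVmem : ∀ v : Int, v ∈ V ↔ v ∈ s1 ∨ v ∈ s2 := by
    intro v
    rw [hVdef, PySem.List.mem_sorted, PySem.Set.mem_ofList, List.mem_append]
  apply PySem.List.eq_of_perm_of_pairwise_le_of_injective (key := fun x => x)
      (fun a b h => h)
  · apply List.perm_iff_count.mpr
    intro v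
    rw [md_count s1 s2 hs1 hs2 v,
        flatMap_replicate_count V _ hVnd v]
    by_cases h : v ∈ V
    · simp [h]
    · have h1 : v ∉ s1 ∧ v ∉ s2 := by
        have := (hVmem v).mpr; tauto
      rw [List.count_eq_zero.mpr h1.1, List.count_eq_zero.mpr h1.2]
      simp [h]
  · exact md_pairwise s1 s2 hs1 hs2
  · exact flatMap_replicate_pairwise V _ hVlt
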